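-- pv_equiv track=rewrite | github.com/tetronoz/adventofcode2019 | day1/python/day1_2.py | calculate_module_mass
-- ===== SOURCE A (Python) =====
-- def calculate_module_mass(mass):
--     fuel_mass = mass//3-2
--     total = fuel_mass
--     while fuel_mass > 0:
--         fuel_mass = fuel_mass//3 - 2
--         if fuel_mass > 0:
--             total += fuel_mass
--
--     return total
-- ===== SOURCE B (Python) =====
-- def _extra(f):
--     nxt = f // 3 - 2
--     if nxt <= 0:
--         return 0
--     return nxt + _extra(nxt)
--
--
-- def calculate_module_mass(mass):
--     fuel = mass // 3 - 2
--     return fuel + _extra(fuel)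
-- ===== Notes on version B (the rewrite author's own statement) =====
-- stated objective: alternative
-- what changed: Replaces A's imperative while-loop with mutable fuel/total accumulators by a recursive decomposition: fuel + extra(fuel), where extra computes the cascading fuel tail and stops contributing once the next term is non-positive.
import Mathlib
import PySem

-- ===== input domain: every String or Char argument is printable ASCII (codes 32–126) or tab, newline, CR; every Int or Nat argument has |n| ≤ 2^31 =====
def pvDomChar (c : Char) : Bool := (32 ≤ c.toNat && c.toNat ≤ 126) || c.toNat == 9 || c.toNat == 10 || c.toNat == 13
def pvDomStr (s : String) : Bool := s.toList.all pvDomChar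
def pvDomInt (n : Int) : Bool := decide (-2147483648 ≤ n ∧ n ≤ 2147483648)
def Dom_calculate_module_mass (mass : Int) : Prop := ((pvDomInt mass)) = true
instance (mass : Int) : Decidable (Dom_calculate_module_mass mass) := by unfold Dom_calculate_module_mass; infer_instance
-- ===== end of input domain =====

-- B replaces A's while-loop with accumulators by a recursive fuel + extra(fuel) decomposition (alternative structure, same cost).

-- Termination helpers, cited by name in the ports' decreasing_by.
theorem pvShrink (f : Int) (hf : 0 < f) : (PySem.Int.floordiv f 3 - 2).toNat < f.toNat := by
  have h3 : PySem.Int.floordiv f 3 = f / 3 :=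
    PySem.Int.floordiv_eq_ediv_of_pos (by decide)
  have h1 : f / 3 ≤ f := Int.ediv_le_self 3 hf.le
  have h2 : f / 3 - 2 < f := lt_of_le_of_lt (sub_le_sub_right h1 2) (sub_lt_self f (by decide))
  rw [h3]
  exact (Int.toNat_lt_toNat hf).mpr h2

theorem pvPos (f : Int) (h : ¬ (PySem.Int.floordiv f 3 - 2 ≤ 0)) : 0 < f := by
  have h3 : PySem.Int.floordiv f 3 = f / 3 :=
    PySem.Int.floordiv_eq_ediv_of_pos (by decide)
  have h2 : (3:Int) ≤ f / 3 := by
    have h1 := sub_pos.mp (not_le.mp h)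
    rw [h3] at h1
    calc (3:Int) = 2 + 1 := by decide
    _ ≤ f / 3 := Int.lt_iff_add_one_le.mp h1
  have h9 : (3:Int) * 3 ≤ f := (Int.le_ediv_iff_mul_le (by decide)).mp h2
  exact lt_of_lt_of_le (by decide) h9

-- ===== PORT A =====
-- A's while-loop: state (fuel_mass, total); terminates because fuel_mass strictly shrinks while positive.
def pvLoopA (fuel total : Int) : Int :=
  if fuel > 0 then
    let f' := PySem.Int.floordiv fuel 3 - 2
    pvLoopA f' (if f' > 0 then total + f' else total)
  else total
termination_by fuel.toNat
decreasing_by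
  exact pvShrink fuel (by assumption)

def calculate_module_mass (mass : Int) : Int :=
  let fuel_mass := PySem.Int.floordiv mass 3 - 2
  pvLoopA fuel_mass fuel_mass

-- ===== PORT B =====
def pvExtra (f : Int) : Int :=
  let nxt := PySem.Int.floordiv f 3 - 2
  if nxt ≤ 0 then 0 else nxt + pvExtra nxt
termination_by f.toNat
decreasing_by
  exact pvShrink f (pvPos f (by assumption))

def calculate_module_mass_alt (mass : Int) : Int :=
  let fuel := PySem.Int.floordiv mass 3 - 2
  fuel + pvExtra fuel

-- ===== PRECONDITION & SPEC =====
def Spec_calculate_module_mass (mass : Int) (out : Int) : Prop := out = calculate_module_mass_alt mass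
instance (mass : Int) (out : Int) : Decidable (Spec_calculate_module_mass mass out) := by unfold Spec_calculate_module_mass; infer_instance

-- ===== CLAIM (what is proved, stated in full; the proofs are below) =====
def Claim_equal_calculate_module_mass : Prop := ∀ (mass : Int), Dom_calculate_module_mass mass → Spec_calculate_module_mass mass (calculate_module_mass mass)

-- ===== LEMMAS AND PROOFS =====

theorem pvExtra_nonpos {f : Int} (hf : f ≤ 0) : pvExtra f = 0 := by
  rw [pvExtra.eq_def]
  simp only [PySem.Int.floordiv_eq_ediv_of_pos (by norm_num : (0:Int) < 3)]
  rw [if_pos (by omega)]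

theorem pvLoopA_eq_extra : ∀ (n : Nat) (f t : Int), f.toNat = n → pvLoopA f t = t + pvExtra f := by
  intro n
  induction n using Nat.strong_induction_on with
  | _ n ih =>
    intro f t hn
    rw [pvLoopA]
    by_cases hf : f > 0
    · rw [if_pos hf]
      have h3 : PySem.Int.floordiv f 3 = f / 3 :=
        PySem.Int.floordiv_eq_ediv_of_pos (by norm_num)
      set f' : Int := PySem.Int.floordiv f 3 - 2 with hf'
      have hlt : f'.toNat < n := by rw [← hn, hf', h3]; omega
      rw [ih f'.toNat hlt f' _ rfl]
      have hef : pvExtra f = if f' ≤ 0 then (0:Int) else f' + pvExtra f' := by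
        rw [pvExtra.eq_def]
      rw [hef]
      by_cases hp : f' > 0
      · rw [if_pos hp, if_neg (by omega)]; ring
      · rw [if_neg hp, if_pos (by omega), pvExtra_nonpos (by omega)]
    · rw [if_neg hf, pvExtra_nonpos (by omega)]
      ring

-- ===== VERDICT (by name: the statement is the Claim_ definition above) =====
theorem calculate_module_mass_spec : Claim_equal_calculate_module_mass := by
  intro mass _
  unfold Spec_calculate_module_mass calculate_module_mass calculate_module_mass_alt
  exact pvLoopA_eq_extra _ _ _ rfl
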